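-- pv_equiv track=rewrite | github.com/mtdykly/bv-ae | src/frontend/ir_builder.py | _find_contiguous_slice
-- ===== SOURCE A (Python) =====
-- def _find_contiguous_slice(parent_bits: list[dict], child_bits: list[dict]) -> int | None:
--     w = len(child_bits)
--     if w == 0 or w > len(parent_bits):
--         return None
--     for off in range(0, len(parent_bits) - w + 1):
--         if parent_bits[off:off + w] == child_bits:
--             return off
--     return None
-- ===== SOURCE B (Python) =====
-- # Rabin-Karp-style search: per-dict order-insensitive hashes, prefix sums of them,
-- # and a window-sum filter per offset; full comparison runs only on hash hits.
-- def _find_contiguous_slice(parent_bits: list[dict], child_bits: list[dict]) -> int | None: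
--     w = len(child_bits)
--     n = len(parent_bits)
--     if w == 0 or w > n:
--         return None
--
--     M = 1000000007
--
--     def h(d):
--         acc = 0
--         for k, v in d.items():
--             kh = 0
--             for ch in k:
--                 kh = (kh * 131 + ord(ch)) % M
--             acc += (kh * 1000003 + v) % M
--         return acc
--
--     target = 0
--     for d in child_bits:
--         target += h(d)
--
--     pre = [0]
--     acc = 0
--     for d in parent_bits:
--         acc += h(d)
--         pre.append(acc)
--
--     for off in range(0, n - w + 1):
--         if pre[off + w] - pre[off] == target and all(
--                 parent_bits[off + j] == child_bits[j] for j in range(w)):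
--             return off
--     return None
-- ===== Notes on version B (the rewrite author's own statement) =====
-- stated objective: alternative
-- what changed: B replaces A's per-offset slice-copy-and-compare with a Rabin-Karp-style scheme: order-insensitive per-dict hashes, their prefix sums, a window-sum filter per offset, and an element-wise early-exit verification only on hash hits.
import Mathlib
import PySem

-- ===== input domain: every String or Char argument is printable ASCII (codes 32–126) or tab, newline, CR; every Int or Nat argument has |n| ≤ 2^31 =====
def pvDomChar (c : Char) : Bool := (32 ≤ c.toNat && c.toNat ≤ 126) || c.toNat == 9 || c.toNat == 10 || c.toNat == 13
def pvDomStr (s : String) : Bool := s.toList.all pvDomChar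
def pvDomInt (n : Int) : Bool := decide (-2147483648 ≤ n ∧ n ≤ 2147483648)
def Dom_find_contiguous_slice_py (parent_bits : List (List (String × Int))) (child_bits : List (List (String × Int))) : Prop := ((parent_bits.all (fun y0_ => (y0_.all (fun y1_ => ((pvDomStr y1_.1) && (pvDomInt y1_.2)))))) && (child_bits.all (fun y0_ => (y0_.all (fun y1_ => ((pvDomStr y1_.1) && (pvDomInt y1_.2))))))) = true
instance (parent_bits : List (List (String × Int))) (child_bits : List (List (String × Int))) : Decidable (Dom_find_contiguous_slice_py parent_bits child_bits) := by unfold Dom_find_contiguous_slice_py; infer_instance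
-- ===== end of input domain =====

-- B replaces A's per-offset slice comparison by a prefix-sum window-hash filter
-- with element-wise verification only on hash hits (objective: alternative).
-- An inner list stands for a Python dict, so element '==' is dict equality
-- (order-insensitive, duplicate keys collapsed): pvDictEq below is that '==',
-- shared by both ports.

-- ===== PORT A =====
-- Python '==' on two dicts given as association lists (via dict(...): last value
-- wins, key order by first occurrence): equal sizes and every item of the first
-- found in the second.
def pvDictEq (a b : List (String × Int)) : Bool :=
  let da := PySem.Dict.ofList a
  let db := PySem.Dict.ofList b
  da.size == db.size && da.items.all (fun kv => db.get? kv.1 == some kv.2)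

-- Python '==' on two lists of dicts.
def pvListEq (xs ys : List (List (String × Int))) : Bool :=
  xs.length == ys.length && (xs.zip ys).all (fun p => pvDictEq p.1 p.2)

-- 'for off in range(...): if parent[off:off+w] == child: return off'
def pvALoop (p c : List (List (String × Int))) : List Int → Option Int
  | [] => none
  | off :: rest =>
    if pvListEq (PySem.List.slice p (some off) (some (off + (c.length : Int)))) c then some off
    else pvALoop p c rest

def find_contiguous_slice_py (parent_bits : List (List (String × Int))) (child_bits : List (List (String × Int))) : Option Int :=
  let w := child_bits.length
  if w = 0 ∨ parent_bits.length < w then none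
  else pvALoop parent_bits child_bits
    (PySem.List.pyRange 0 ((parent_bits.length : Int) - (w : Int) + 1))

-- ===== PORT B =====
-- h's inner string hash: for ch in k: kh = (kh*131 + ord(ch)) % M
def pvStrHash (s : String) : Int :=
  s.toList.foldl (fun kh ch => PySem.Int.mod (kh * 131 + (ch.toNat : Int)) 1000000007) 0

-- h(d): order-insensitive dict hash, summed over d.items()
def pvDictHash (d : List (String × Int)) : Int :=
  (PySem.Dict.ofList d).items.foldl
    (fun acc kv => acc + PySem.Int.mod (pvStrHash kv.1 * 1000003 + kv.2) 1000000007) 0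

-- 'if pre[off+w]-pre[off] == target and parent[off:off+w] == child: return off'
def pvBLoop (p c : List (List (String × Int))) (pre : List Int) (target : Int) : List Int → Option Int
  | [] => none
  | off :: rest =>
    if (PySem.List.pyGetD pre (off + (c.length : Int)) 0 - PySem.List.pyGetD pre off 0 == target)
        && (PySem.List.pyRange 0 (c.length : Int)).all
            (fun jj => pvDictEq (PySem.List.pyGetD p (off + jj) []) (PySem.List.pyGetD c jj []))
    then some off
    else pvBLoop p c pre target rest

def find_contiguous_slice_py_alt (parent_bits : List (List (String × Int))) (child_bits : List (List (String × Int))) : Option Int :=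
  let w := child_bits.length
  if w = 0 ∨ parent_bits.length < w then none
  else
    -- target = sum of h over child_bits; pre = running prefix sums of h over parent_bits
    let target := child_bits.foldl (fun acc d => acc + pvDictHash d) 0
    let pre := List.scanl (fun acc d => acc + pvDictHash d) 0 parent_bits  -- the append loop building pre, exactly
    pvBLoop parent_bits child_bits pre target
      (PySem.List.pyRange 0 ((parent_bits.length : Int) - (w : Int) + 1))

-- ===== PRECONDITION & SPEC =====
def Spec_find_contiguous_slice_py (parent_bits : List (List (String × Int))) (child_bits : List (List (String × Int))) (out : Option Int) : Prop := out = find_contiguous_slice_py_alt parent_bits child_bits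
instance (parent_bits : List (List (String × Int))) (child_bits : List (List (String × Int))) (out : Option Int) : Decidable (Spec_find_contiguous_slice_py parent_bits child_bits out) := by unfold Spec_find_contiguous_slice_py; infer_instance

-- ===== CLAIM (what is proved, stated in full; the proofs are below) =====
def Claim_equal_find_contiguous_slice_py : Prop := ∀ (parent_bits : List (List (String × Int))) (child_bits : List (List (String × Int))), Dom_find_contiguous_slice_py parent_bits child_bits → Spec_find_contiguous_slice_py parent_bits child_bits (find_contiguous_slice_py parent_bits child_bits)

-- ===== LEMMAS AND PROOFS =====

-- equal-as-dicts lists have equal hashes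
lemma pvDictHash_eq_of_pvDictEq {a b : List (String × Int)} (h : pvDictEq a b = true) :
    pvDictHash a = pvDictHash b := by
  unfold pvDictEq at h
  simp only [Bool.and_eq_true, beq_iff_eq, List.all_eq_true] at h
  obtain ⟨hsize, hmem⟩ := h
  have hperm : (PySem.Dict.ofList a).items.Perm (PySem.Dict.ofList b).items := by
    have hnd : (PySem.Dict.ofList a).items.Nodup := by
      have := PySem.Dict.nodup_keys_ofList (κ := String) (ν := Int) a
      simp only [PySem.Dict.keys] at this
      exact this.of_map
    have hsub : (PySem.Dict.ofList a).items ⊆ (PySem.Dict.ofList b).items := by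
      intro kv hkv
      exact PySem.Dict.mem_items_of_get?_eq_some _ (hmem kv hkv)
    have hlen : (PySem.Dict.ofList b).items.length ≤ (PySem.Dict.ofList a).items.length := by
      simp only [PySem.Dict.size] at hsize
      omega
    exact (hnd.subperm hsub).perm_of_length_le hlen
  unfold pvDictHash
  rw [PySem.List.foldl_add, PySem.List.foldl_add]
  exact congrArg (0 + ·) ((hperm.map _).sum_eq)

-- equal lists (as lists of dicts) have equal hash sums
lemma sum_pvDictHash_eq : ∀ (xs ys : List (List (String × Int))), pvListEq xs ys = true →
    (xs.map pvDictHash).sum = (ys.map pvDictHash).sum := by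
  intro xs
  induction xs with
  | nil =>
    intro ys h
    unfold pvListEq at h
    simp only [Bool.and_eq_true, beq_iff_eq, List.length_nil] at h
    have : ys = [] := List.eq_nil_of_length_eq_zero h.1.symm
    simp [this]
  | cons x xs ih =>
    intro ys h
    cases ys with
    | nil => unfold pvListEq at h; simp at h
    | cons y ys =>
      unfold pvListEq at h
      simp only [Bool.and_eq_true, beq_iff_eq, List.length_cons, List.zip_cons_cons,
        List.all_cons, List.all_eq_true] at h
      obtain ⟨hlen, hd, tl⟩ := h
      have ihh : pvListEq xs ys = true := by
        unfold pvListEq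
        simp only [Bool.and_eq_true, beq_iff_eq, List.all_eq_true]
        exact ⟨by omega, fun p hp => tl p hp⟩
      simp only [List.map_cons, List.sum_cons, ih ys ihh, pvDictHash_eq_of_pvDictEq hd]

-- prefix sums via scanl: entry i is init + sum of the first i hashes
lemma pvScanl_getD (f : List (String × Int) → Int) :
    ∀ (l : List (List (String × Int))) (s : Int) (i : Nat), i ≤ l.length →
    (List.scanl (fun acc d => acc + f d) s l).getD i 0 = s + ((l.take i).map f).sum := by
  intro l
  induction l with
  | nil =>
    intro s i hi
    have : i = 0 := Nat.le_zero.mp hi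
    subst this
    simp
  | cons x xs ih =>
    intro s i hi
    cases i with
    | zero => simp [List.scanl]
    | succ j =>
      rw [List.scanl_cons, List.getD_cons_succ]
      rw [ih (s + f x) j (by simpa using hi)]
      simp only [List.take_succ_cons, List.map_cons, List.sum_cons]
      ring

-- 'all(f(j) for j in range(len(c)))' as a statement over Nat indices
lemma pvRangeAll_iff (c : List (List (String × Int))) (f : Int → Bool) :
    ((PySem.List.pyRange 0 (c.length : Int)).all f = true) ↔
    ∀ k : Nat, k < c.length → f (k : Int) = true := by
  rw [List.all_eq_true]
  constructor
  · intro h k hk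
    exact h (k : Int) (PySem.List.mem_pyRange_one.mpr ⟨by positivity, by exact_mod_cast hk⟩)
  · intro h x hx
    obtain ⟨hx0, hx1⟩ := PySem.List.mem_pyRange_one.mp hx
    have : x = (x.toNat : Int) := (Int.toNat_of_nonneg hx0).symm
    rw [this]
    exact h x.toNat (by omega)

-- zip-all over equal-length lists is index-wise all
lemma pvZipAll_iff : ∀ (xs c : List (List (String × Int))), xs.length = c.length →
    (((xs.zip c).all fun pr => pvDictEq pr.1 pr.2) = true ↔
      ∀ k : Nat, k < c.length → pvDictEq (xs.getD k []) (c.getD k []) = true) := by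
  intro xs
  induction xs with
  | nil =>
    intro c hlen
    have : c = [] := List.eq_nil_of_length_eq_zero hlen.symm
    subst this
    simp
  | cons x xs ih =>
    intro c hlen
    cases c with
    | nil => simp at hlen
    | cons y c =>
      simp only [List.zip_cons_cons, List.all_cons, Bool.and_eq_true, List.length_cons]
      rw [ih c (by simpa using hlen)]
      constructor
      · rintro ⟨h0, h⟩ k hk
        cases k with
        | zero => simpa using h0
        | succ k => simpa using h k (by omega)
      · intro h
        refine ⟨by simpa using h 0 (by omega), fun k hk => ?_⟩
        simpa using h (k + 1) (by omega)

-- B's element-wise verification equals A's slice comparison at an in-range offset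
lemma pvVerify_eq (p c : List (List (String × Int))) (off : Int)
    (h0 : 0 ≤ off) (h1 : off.toNat + c.length ≤ p.length) :
    ((PySem.List.pyRange 0 (c.length : Int)).all
      (fun jj => pvDictEq (PySem.List.pyGetD p (off + jj) []) (PySem.List.pyGetD c jj [])))
    = pvListEq (PySem.List.slice p (some off) (some (off + (c.length : Int)))) c := by
  set j := off.toNat with hj
  have hoff : off = (j : Int) := (Int.toNat_of_nonneg h0).symm
  have hslice : PySem.List.slice p (some off) (some (off + (c.length : Int)))
      = (p.drop j).take c.length := by
    rw [hoff]
    exact PySem.List.slice_natCast_add p j c.length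
  have hlen : ((p.drop j).take c.length).length = c.length := by
    simp only [List.length_take, List.length_drop]
    omega
  rw [Bool.eq_iff_iff, hslice, pvRangeAll_iff]
  unfold pvListEq
  simp only [Bool.and_eq_true, beq_iff_eq, hlen]
  rw [pvZipAll_iff _ _ hlen]
  have hpoint : ∀ k : Nat, k < c.length →
      (pvDictEq (PySem.List.pyGetD p (off + (k : Int)) []) (PySem.List.pyGetD c (k : Int) [])
        = pvDictEq (((p.drop j).take c.length).getD k []) (c.getD k [])) := by
    intro k hk
    have hcast : off + (k : Int) = ((j + k : Nat) : Int) := by rw [hoff]; push_cast; ring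
    rw [hcast, PySem.List.pyGetD_natCast, PySem.List.pyGetD_natCast]
    have hb1 : k < ((p.drop j).take c.length).length := by omega
    have hb2 : j + k < p.length := by omega
    rw [List.getD_eq_getElem _ _ hb1, List.getD_eq_getElem _ _ hb2,
      List.getElem_take, List.getElem_drop]
  constructor
  · intro h
    exact ⟨trivial, fun k hk => by rw [← hpoint k hk]; exact h k hk⟩
  · intro h k hk
    rw [hpoint k hk]
    exact h.2 k hk

-- the window-hash test is implied by the full comparison, so B's compound test
-- equals A's test at every in-range offset
lemma pvPred_eq (p c : List (List (String × Int))) (off : Int)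
    (h0 : 0 ≤ off) (h1 : off.toNat + c.length ≤ p.length) :
    ((PySem.List.pyGetD (List.scanl (fun acc d => acc + pvDictHash d) 0 p) (off + (c.length : Int)) 0
        - PySem.List.pyGetD (List.scanl (fun acc d => acc + pvDictHash d) 0 p) off 0
        == c.foldl (fun acc d => acc + pvDictHash d) 0)
      && (PySem.List.pyRange 0 (c.length : Int)).all
          (fun jj => pvDictEq (PySem.List.pyGetD p (off + jj) []) (PySem.List.pyGetD c jj [])))
    = pvListEq (PySem.List.slice p (some off) (some (off + (c.length : Int)))) c := by
  rw [pvVerify_eq p c off h0 h1]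
  set j := off.toNat with hj
  have hoff : off = (j : Int) := (Int.toNat_of_nonneg h0).symm
  cases hA : pvListEq (PySem.List.slice p (some off) (some (off + (c.length : Int)))) c with
  | false => simp
  | true =>
    simp only [Bool.and_true]
    rw [beq_iff_eq]
    have hslice : PySem.List.slice p (some off) (some (off + (c.length : Int)))
        = (p.drop j).take c.length := by
      rw [hoff]
      exact PySem.List.slice_natCast_add p j c.length
    rw [hoff]
    have hcast : (j : Int) + (c.length : Int) = ((j + c.length : Nat) : Int) := by push_cast; ring
    rw [hcast, PySem.List.pyGetD_natCast, PySem.List.pyGetD_natCast]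
    rw [pvScanl_getD pvDictHash p 0 (j + c.length) (by omega),
        pvScanl_getD pvDictHash p 0 j (by omega)]
    rw [PySem.List.foldl_add]
    have hwin : ((p.take (j + c.length)).map pvDictHash).sum
        = ((p.take j).map pvDictHash).sum + (((p.drop j).take c.length).map pvDictHash).sum := by
      rw [List.take_add, List.map_append, List.sum_append]
    rw [hwin]
    have := sum_pvDictHash_eq _ _ (hslice ▸ hA)
    rw [this]; ring

-- the two loops agree when the predicates agree on every visited offset
lemma pvLoop_eq (p c : List (List (String × Int))) (pre : List Int) (target : Int) :
    ∀ (offs : List Int),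
    (∀ off ∈ offs,
      ((PySem.List.pyGetD pre (off + (c.length : Int)) 0 - PySem.List.pyGetD pre off 0 == target)
        && (PySem.List.pyRange 0 (c.length : Int)).all
            (fun jj => pvDictEq (PySem.List.pyGetD p (off + jj) []) (PySem.List.pyGetD c jj [])))
      = pvListEq (PySem.List.slice p (some off) (some (off + (c.length : Int)))) c) →
    pvBLoop p c pre target offs = pvALoop p c offs := by
  intro offs
  induction offs with
  | nil => intro _; rfl
  | cons off rest ih =>
    intro h
    unfold pvBLoop pvALoop
    rw [h off (List.mem_cons_self ..)]
    split
    · rfl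
    · exact ih (fun o ho => h o (List.mem_cons_of_mem _ ho))

-- ===== VERDICT (by name: the statement is the Claim_ definition above) =====
theorem find_contiguous_slice_py_spec : Claim_equal_find_contiguous_slice_py := by
  intro p c _
  unfold Spec_find_contiguous_slice_py find_contiguous_slice_py find_contiguous_slice_py_alt
  simp only []
  split
  · rfl
  · rename_i hguard
    simp only [not_or, not_lt] at hguard
    refine (pvLoop_eq p c _ _ _ fun off hoff => ?_).symm
    rw [PySem.List.mem_pyRange_one] at hoff
    exact pvPred_eq p c off hoff.1 (by omega)
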